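-- pv_equiv track=rewrite | github.com/daniametller/hackerrank | algorithms/angryProfessor.py | getNumOnTimeStudents
-- ===== SOURCE A (Python) =====
-- def getNumOnTimeStudents(studentList):
--     studentList.sort()
--     i = 0
--     on_time_counter = int(0)
--     for i in range(0, len(studentList)):
--         if studentList[i] <=0:
--             on_time_counter += 1
--         else:
--             return on_time_counter
--     return on_time_counter
-- ===== SOURCE B (Python) =====
-- def getNumOnTimeStudents(studentList):
--     studentList.sort()
--     lo, hi = 0, len(studentList)
--     while lo < hi:
--         mid = (lo + hi) // 2
--         if studentList[mid] <= 0: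
--             lo = mid + 1
--         else:
--             hi = mid
--     return lo
-- ===== Notes on version B (the rewrite author's own statement) =====
-- stated objective: alternative
-- what changed: After the same in-place sort, B locates the count of non-positive arrivals with a hand-written bisect-right binary search instead of A's linear early-return scan over the prefix.
import Mathlib
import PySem

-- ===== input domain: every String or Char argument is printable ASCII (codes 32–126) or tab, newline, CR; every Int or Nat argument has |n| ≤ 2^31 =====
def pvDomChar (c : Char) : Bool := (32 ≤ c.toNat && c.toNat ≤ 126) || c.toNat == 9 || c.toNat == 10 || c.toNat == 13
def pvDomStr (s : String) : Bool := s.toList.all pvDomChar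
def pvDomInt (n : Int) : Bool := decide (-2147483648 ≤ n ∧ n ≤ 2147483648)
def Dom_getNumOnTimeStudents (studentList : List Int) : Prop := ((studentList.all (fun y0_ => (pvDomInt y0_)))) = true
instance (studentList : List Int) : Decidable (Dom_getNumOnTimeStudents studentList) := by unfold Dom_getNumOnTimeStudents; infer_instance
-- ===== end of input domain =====

-- B replaces A's linear early-return scan (after the same in-place sort) by a bisect-right
-- binary search; both Pythons sort the argument in place, the theorems are about the return value.

-- ===== PORT A =====
-- the for-loop with early return: counts the prefix of non-positive entries
def pvLoopA : List Int → Int → Int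
  | [], c => c
  | x :: xs, c => if x ≤ 0 then pvLoopA xs (c + 1) else c

def getNumOnTimeStudents (studentList : List Int) : Int :=
  pvLoopA (PySem.List.sorted studentList (fun x => x) false) 0

-- ===== PORT B =====
-- hand-written bisect_right(s, 0): mid is always in range, so getD mid 0 = s[mid]
def pvBisect (xs : List Int) (lo hi : Nat) : Nat :=
  if lo < hi then
    let mid := (lo + hi) / 2
    if xs.getD mid 0 ≤ 0 then pvBisect xs (mid + 1) hi else pvBisect xs lo mid
  else lo
termination_by hi - lo
decreasing_by all_goals omega

def getNumOnTimeStudents_alt (studentList : List Int) : Int :=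
  let s := PySem.List.sorted studentList (fun x => x) false
  ((pvBisect s 0 s.length : Nat) : Int)

-- ===== PRECONDITION & SPEC =====
def Spec_getNumOnTimeStudents (studentList : List Int) (out : Int) : Prop := out = getNumOnTimeStudents_alt studentList
instance (studentList : List Int) (out : Int) : Decidable (Spec_getNumOnTimeStudents studentList out) := by unfold Spec_getNumOnTimeStudents; infer_instance

-- ===== CLAIM (what is proved, stated in full; the proofs are below) =====
def Claim_equal_getNumOnTimeStudents : Prop := ∀ (studentList : List Int), Dom_getNumOnTimeStudents studentList → Spec_getNumOnTimeStudents studentList (getNumOnTimeStudents studentList)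

-- ===== LEMMAS AND PROOFS =====

-- A's loop counts the non-positive prefix
theorem pvLoopA_eq_takeWhile (s : List Int) (c : Int) :
    pvLoopA s c = c + ((s.takeWhile (fun x => decide (x ≤ 0))).length : Int) := by
  induction s generalizing c with
  | nil => simp [pvLoopA]
  | cons x xs ih =>
    by_cases hx : x ≤ 0
    · simp [pvLoopA, hx, ih]; ring
    · simp [pvLoopA, hx]

-- prefix property of takeWhile (via getD)
theorem takeWhile_getD_le (s : List Int) (i : Nat)
    (hi : i < (s.takeWhile (fun x => decide (x ≤ 0))).length) : s.getD i 0 ≤ 0 := by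
  induction s generalizing i with
  | nil => simp at hi
  | cons x xs ih =>
    by_cases hx : x ≤ 0
    · cases i with
      | zero => simpa using hx
      | succ j =>
        simp only [List.takeWhile_cons, hx, decide_true, if_true, List.length_cons] at hi
        simpa using ih j (by omega)
    · simp [hx] at hi

-- boundary property of takeWhile
theorem takeWhile_getD_gt (s : List Int)
    (h : (s.takeWhile (fun x => decide (x ≤ 0))).length < s.length) :
    ¬ s.getD (s.takeWhile (fun x => decide (x ≤ 0))).length 0 ≤ 0 := by
  induction s with
  | nil => simp at h
  | cons x xs ih =>
    by_cases hx : x ≤ 0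
    · simp only [List.takeWhile_cons, hx, decide_true, if_true, List.length_cons] at h ⊢
      simpa using ih (by omega)
    · simp [List.takeWhile_cons, hx]

-- monotonicity of a pairwise-≤ list via getD
theorem pairwise_getD_mono (s : List Int) (hs : s.Pairwise (· ≤ ·)) (i j : Nat)
    (hij : i ≤ j) (hj : j < s.length) : s.getD i 0 ≤ s.getD j 0 := by
  rw [List.getD_eq_getElem s 0 (by omega), List.getD_eq_getElem s 0 hj]
  rcases Nat.lt_or_ge i j with h | h
  · exact (List.pairwise_iff_getElem.mp hs) i j (by omega) hj h
  · have : i = j := by omega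
    subst this; exact le_refl _

-- the binary search finds the takeWhile boundary on a sorted list
theorem pvBisect_eq (s : List Int) (hs : s.Pairwise (· ≤ ·)) (lo hi : Nat)
    (hlo : lo ≤ (s.takeWhile (fun x => decide (x ≤ 0))).length)
    (hhi : (s.takeWhile (fun x => decide (x ≤ 0))).length ≤ hi)
    (hlen : hi ≤ s.length) :
    pvBisect s lo hi = (s.takeWhile (fun x => decide (x ≤ 0))).length := by
  set k := (s.takeWhile (fun x => decide (x ≤ 0))).length with hk
  rw [pvBisect]
  by_cases hlt : lo < hi
  · simp only [hlt, if_true]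
    set mid := (lo + hi) / 2 with hmid
    have hmr : lo ≤ mid ∧ mid < hi := by constructor <;> omega
    by_cases hv : s.getD mid 0 ≤ 0
    · simp only [hv, if_true]
      have hmk : mid < k := by
        by_contra hcon
        have hkm : k ≤ mid := by omega
        have hkl : k < s.length := by omega
        exact takeWhile_getD_gt s (by omega)
          (le_trans (pairwise_getD_mono s hs k mid hkm (by omega)) hv)
      exact pvBisect_eq s hs (mid + 1) hi (by omega) hhi hlen
    · simp only [hv, if_false]
      have hkm : k ≤ mid := by
        by_contra hcon
        exact hv (takeWhile_getD_le s mid (by omega))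
      exact pvBisect_eq s hs lo mid hlo hkm (by omega)
  · simp only [hlt, if_false]
    omega
termination_by hi - lo
decreasing_by all_goals omega

-- ===== VERDICT (by name: the statement is the Claim_ definition above) =====
theorem getNumOnTimeStudents_spec : Claim_equal_getNumOnTimeStudents := by
  intro studentList _
  unfold Spec_getNumOnTimeStudents getNumOnTimeStudents getNumOnTimeStudents_alt
  set s := PySem.List.sorted studentList (fun x => x) false with hsdef
  have hs : s.Pairwise (· ≤ ·) := PySem.List.sorted_pairwise studentList (fun x => x)
  have hlen : (s.takeWhile (fun x => decide (x ≤ 0))).length ≤ s.length :=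
    (List.takeWhile_sublist _).length_le
  rw [pvLoopA_eq_takeWhile]
  show (0 : Int) + _ = ((pvBisect s 0 s.length : Nat) : Int)
  rw [pvBisect_eq s hs 0 s.length (by omega) hlen (le_refl _)]
  simp
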